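-- pv_equiv track=rewrite | github.com/Tyler-Schwenk/BirdNET-CustomClassifierSuite | birdnet_custom_classifier_suite/ui/hard_negative/engine.py | _find_confidence_column
-- ===== SOURCE A (Python) =====
-- def _find_confidence_column(cols):
--     # returns the first column that looks like a confidence column
--     for c in cols:
--         lc = c.lower()
--         if lc.endswith('confidence') or lc.endswith('conf') or 'radr' in lc:
--             return c
--     # fallback: any numeric column besides file/time
--     for c in cols:
--         lc = c.lower()
--         if lc in ('confidence', 'score'):
--             return c
--     return None
-- ===== SOURCE B (Python) =====
-- def _find_confidence_column(cols):
--     # Single pass: return a primary match immediately; remember the first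
--     # fallback candidate and return it only after the whole scan, so a later
--     # primary match still wins.  An exact 'confidence' always satisfies the
--     # primary test (it ends with 'confidence'), so only 'score' can ever be
--     # the fallback.
--     fallback = None
--     for c in cols:
--         lc = c.lower()
--         if lc.endswith('confidence') or lc.endswith('conf') or 'radr' in lc:
--             return c
--         if fallback is None and lc == 'score':
--             fallback = c
--     return fallback
-- ===== Notes on version B (the rewrite author's own statement) =====
-- stated objective: simpler
-- what changed: Replaced A's two full passes (primary scan, then a separate fallback scan) by a single pass that returns a primary match immediately and carries the first 'score' fallback to the end of the scan.
import Mathlib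
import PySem

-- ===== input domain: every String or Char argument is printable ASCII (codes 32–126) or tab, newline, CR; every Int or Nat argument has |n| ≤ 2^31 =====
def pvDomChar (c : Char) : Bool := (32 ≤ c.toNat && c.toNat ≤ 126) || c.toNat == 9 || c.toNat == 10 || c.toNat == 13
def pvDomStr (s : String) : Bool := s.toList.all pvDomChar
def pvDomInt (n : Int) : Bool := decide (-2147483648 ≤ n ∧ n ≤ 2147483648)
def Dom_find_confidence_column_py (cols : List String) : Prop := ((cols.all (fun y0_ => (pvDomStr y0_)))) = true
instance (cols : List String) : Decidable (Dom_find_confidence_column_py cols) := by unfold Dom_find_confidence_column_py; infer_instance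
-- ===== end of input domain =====

-- B does A's job in one pass instead of two: a primary match returns at once, the first 'score'
-- fallback is carried through the scan and returned only at the end (objective: simpler).

-- ===== PORT A =====
-- primary test of A's first loop
def pvPrim (c : String) : Bool :=
  let lc := PySem.Str.lower c
  PySem.Str.endswith lc "confidence" || PySem.Str.endswith lc "conf" || PySem.Str.isIn "radr" lc

-- fallback test of A's second loop: lc in ('confidence', 'score')
def pvFall (c : String) : Bool :=
  let lc := PySem.Str.lower c
  lc == "confidence" || lc == "score"

def find_confidence_column_py (cols : List String) : Option String :=
  match cols.find? pvPrim with
  | some c => some c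
  | none => cols.find? pvFall

-- ===== PORT B =====
def pvAltGo : List String → Option String → Option String
  | [], fallback => fallback
  | c :: rest, fallback =>
    -- same primary condition on c.lower() as A's first loop (pvPrim)
    if pvPrim c then
      some c
    else
      pvAltGo rest (if fallback.isNone && PySem.Str.lower c == "score" then some c else fallback)

def find_confidence_column_py_alt (cols : List String) : Option String :=
  pvAltGo cols none

-- ===== PRECONDITION & SPEC =====
def Spec_find_confidence_column_py (cols : List String) (out : Option String) : Prop := out = find_confidence_column_py_alt cols
instance (cols : List String) (out : Option String) : Decidable (Spec_find_confidence_column_py cols out) := by unfold Spec_find_confidence_column_py; infer_instance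

-- ===== CLAIM (what is proved, stated in full; the proofs are below) =====
def Claim_equal_find_confidence_column_py : Prop := ∀ (cols : List String), Dom_find_confidence_column_py cols → Spec_find_confidence_column_py cols (find_confidence_column_py cols)

-- ===== LEMMAS AND PROOFS =====

-- with a set fallback, B's loop returns the first primary match, else the fallback
theorem pvAltGo_some (cols : List String) (f : String) :
    pvAltGo cols (some f) =
      match cols.find? pvPrim with
      | some c => some c
      | none => some f := by
  induction cols with
  | nil => rfl
  | cons c rest ih =>
    by_cases h : pvPrim c = true
    · simp [pvAltGo, h]
    · have h' : pvPrim c = false := by simpa using h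
      simp [pvAltGo, h', ih]

-- an exact 'confidence' column already passes A's primary test
theorem pvPrim_of_confidence (c : String) (h : PySem.Str.lower c = "confidence") :
    pvPrim c = true := by
  simp only [pvPrim, h]
  decide

-- A and B agree on every input
theorem pvPorts_agree (cols : List String) :
    find_confidence_column_py cols = find_confidence_column_py_alt cols := by
  unfold find_confidence_column_py find_confidence_column_py_alt
  induction cols with
  | nil => rfl
  | cons c rest ih =>
    by_cases hp : pvPrim c = true
    · simp [hp, pvAltGo]
    · have hp' : pvPrim c = false := by simpa using hp
      by_cases hs : (PySem.Str.lower c == "score") = true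
      · -- fallback candidate found: both sides fall back to c after scanning rest for a primary
        have hf : pvFall c = true := by simp [pvFall]; right; simpa using hs
        simp [hp', hf, pvAltGo, hs, pvAltGo_some]
      · have hnc : (PySem.Str.lower c == "confidence") = false := by
          by_contra h
          have h2 : (PySem.Str.lower c == "confidence") = true := by simpa using h
          exact absurd (pvPrim_of_confidence c (eq_of_beq h2)) (by simp [hp'])
        have hs' : (PySem.Str.lower c == "score") = false := by simpa using hs
        have hf : pvFall c = false := by simp [pvFall, hnc, hs']
        simp [hp', hf, pvAltGo, hs', ih]

-- ===== VERDICT (by name: the statement is the Claim_ definition above) =====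
theorem find_confidence_column_py_spec : Claim_equal_find_confidence_column_py := by
  intro cols _
  exact pvPorts_agree cols
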